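-- pv_equiv track=rewrite | github.com/leoferrer15/AZAD-Hardering-Framework | Azad_v1.1.py | compute_exposure_score
-- ===== SOURCE A (Python) =====
-- def compute_exposure_score(findings):
--     total = sum(max(0, f.get("risk_points", 0)) for f in findings)
--     if total <= 25:
--         level = "LOW"
--     elif total <= 50:
--         level = "MEDIUM"
--     elif total <= 75:
--         level = "HIGH"
--     else:
--         level = "CRITICAL"
--     return total, level
-- ===== SOURCE B (Python) =====
-- def compute_exposure_score(findings):
--     def total_points(lo, hi):
--         if lo == hi:
--             return 0
--         if hi - lo == 1:
--             p = findings[lo].get("risk_points", 0)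
--             return p if p > 0 else 0
--         mid = (lo + hi) // 2
--         return total_points(lo, mid) + total_points(mid, hi)
--
--     total = total_points(0, len(findings))
--     for bound, name in ((25, "LOW"), (50, "MEDIUM"), (75, "HIGH")):
--         if total <= bound:
--             return total, name
--     return total, "CRITICAL"
-- ===== Notes on version B (the rewrite author's own statement) =====
-- stated objective: alternative
-- what changed: The single-pass generator-sum is replaced by a divide-and-conquer recursion that splits the index range in half and adds the positive points of the two halves, and the if/elif cascade is replaced by a scan over a (threshold, level) table with CRITICAL as the fallback.
import Mathlib
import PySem

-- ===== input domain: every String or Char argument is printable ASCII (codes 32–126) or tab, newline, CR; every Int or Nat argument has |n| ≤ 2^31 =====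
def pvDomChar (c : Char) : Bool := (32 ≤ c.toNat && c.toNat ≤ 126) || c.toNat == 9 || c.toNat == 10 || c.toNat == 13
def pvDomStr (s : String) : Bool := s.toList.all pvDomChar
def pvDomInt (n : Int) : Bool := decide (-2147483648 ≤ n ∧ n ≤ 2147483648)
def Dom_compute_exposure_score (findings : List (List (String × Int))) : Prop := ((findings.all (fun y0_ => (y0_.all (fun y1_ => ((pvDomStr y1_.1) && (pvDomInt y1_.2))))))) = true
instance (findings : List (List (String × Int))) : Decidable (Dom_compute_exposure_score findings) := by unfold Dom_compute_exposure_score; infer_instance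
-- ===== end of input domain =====

-- B replaces the single-pass guarded sum by a divide-and-conquer recursion over the index
-- range and the if/elif cascade by a (threshold, level) table scan; same behaviour.

-- ===== PORT A =====
def compute_exposure_score (findings : List (List (String × Int))) : Int × String :=
  let total := findings.foldl (fun acc f => acc + max 0 (PySem.Dict.getD (PySem.Dict.mk f) "risk_points" 0)) 0
  let level :=
    if total ≤ 25 then "LOW"
    else if total ≤ 50 then "MEDIUM"
    else if total ≤ 75 then "HIGH"
    else "CRITICAL"
  (total, level)

-- ===== PORT B =====
-- total_points(lo, hi): divide-and-conquer sum of the positive risk points of findings[lo:hi].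
-- findings[lo] is always in range at every call (0 ≤ lo < len), so pyGetD's default is never used;
-- the 'hi < lo' branch is an unreachable guard that only makes the recursion total.
def pvTotalPoints (findings : List (List (String × Int))) (lo hi : Int) : Int :=
  if lo = hi then 0
  else if hi - lo = 1 then
    let p := PySem.Dict.getD (PySem.Dict.mk (PySem.List.pyGetD findings lo [])) "risk_points" 0
    if p > 0 then p else 0
  else if hi < lo then 0  -- unreachable termination guard
  else
    let mid := PySem.Int.floordiv (lo + hi) 2
    pvTotalPoints findings lo mid + pvTotalPoints findings mid hi
termination_by (hi - lo).toNat
decreasing_by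
  all_goals
    simp only [PySem.Int.floordiv_eq_ediv_of_pos (by omega : (0:Int) < 2)]
    omega

-- the 'for bound, name in table: if total <= bound: return …' loop, with fallback "CRITICAL"
def pvClassify (total : Int) : List (Int × String) → String
  | [] => "CRITICAL"
  | (b, name) :: rest => if total ≤ b then name else pvClassify total rest

def compute_exposure_score_alt (findings : List (List (String × Int))) : Int × String :=
  let total := pvTotalPoints findings 0 (findings.length : Int)
  (total, pvClassify total [(25, "LOW"), (50, "MEDIUM"), (75, "HIGH")])

-- ===== PRECONDITION & SPEC =====
def Spec_compute_exposure_score (findings : List (List (String × Int))) (out : Int × String) : Prop := out = compute_exposure_score_alt findings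
instance (findings : List (List (String × Int))) (out : Int × String) : Decidable (Spec_compute_exposure_score findings out) := by unfold Spec_compute_exposure_score; infer_instance

-- ===== CLAIM (what is proved, stated in full; the proofs are below) =====
def Claim_equal_compute_exposure_score : Prop := ∀ (findings : List (List (String × Int))), Dom_compute_exposure_score findings → Spec_compute_exposure_score findings (compute_exposure_score findings)

-- ===== LEMMAS AND PROOFS =====

def pvG (f : List (String × Int)) : Int := max 0 (PySem.Dict.getD (PySem.Dict.mk f) "risk_points" 0)

-- the divide-and-conquer sum equals the mapped-sum over the segment
theorem pvTotal_eq (findings : List (List (String × Int))) :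
    ∀ (n : Nat) (lo hi : Int), (hi - lo).toNat = n → 0 ≤ lo → lo ≤ hi → hi ≤ findings.length →
      pvTotalPoints findings lo hi
        = (((findings.drop lo.toNat).take (hi - lo).toNat).map pvG).sum := by
  intro n
  induction n using Nat.strong_induction_on with
  | _ n ih =>
    intro lo hi hn h0 h1 h2
    rw [pvTotalPoints]
    split_ifs with hEq hOne hLt
    · subst hEq; simp
    · -- one-element segment
      have hlt : lo.toNat < findings.length := by omega
      have hseg : (hi - lo).toNat = 1 := by omega
      rw [hseg, List.drop_eq_getElem_cons hlt]
      have hget : PySem.List.pyGetD findings lo [] = findings[lo.toNat] :=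
        PySem.List.pyGetD_eq_getElem findings [] h0 (by omega)
      show (let p := PySem.Dict.getD (PySem.Dict.mk (PySem.List.pyGetD findings lo [])) "risk_points" 0;
        if p > 0 then p else 0)
          = (List.map pvG (List.take 1 (findings[lo.toNat] :: List.drop (lo.toNat + 1) findings))).sum
      rw [hget]
      simp only [List.take_succ_cons, List.take_zero, List.map_cons, List.map_nil,
        List.sum_cons, List.sum_nil, add_zero, pvG]
      omega
    · exact absurd hLt (by omega)
    · rw [show PySem.Int.floordiv (lo + hi) 2 = (lo + hi) / 2 from
        PySem.Int.floordiv_eq_ediv_of_pos (by omega)]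
      show pvTotalPoints findings lo ((lo + hi) / 2) + pvTotalPoints findings ((lo + hi) / 2) hi
        = (List.map pvG (List.take (hi - lo).toNat (List.drop lo.toNat findings))).sum
      rw [ih ((lo + hi) / 2 - lo).toNat (by omega) lo ((lo + hi) / 2) rfl h0 (by omega) (by omega),
          ih (hi - (lo + hi) / 2).toNat (by omega) ((lo + hi) / 2) hi rfl (by omega) (by omega) h2]
      have hsplit : (hi - lo).toNat = ((lo + hi) / 2 - lo).toNat + (hi - (lo + hi) / 2).toNat := by omega
      have hd : (findings.drop lo.toNat).drop ((lo + hi) / 2 - lo).toNat = findings.drop ((lo + hi) / 2).toNat := by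
        rw [List.drop_drop]; congr 1; omega
      rw [hsplit, List.take_add, List.map_append, List.sum_append, hd]

-- the branch cascade equals the table scan
theorem pvLevel_eq (t : Int) :
    (if t ≤ 25 then "LOW" else if t ≤ 50 then "MEDIUM" else if t ≤ 75 then "HIGH" else "CRITICAL")
      = pvClassify t [(25, "LOW"), (50, "MEDIUM"), (75, "HIGH")] := by
  simp [pvClassify]

-- ===== VERDICT (by name: the statement is the Claim_ definition above) =====
theorem compute_exposure_score_spec : Claim_equal_compute_exposure_score := by
  intro findings _
  unfold Spec_compute_exposure_score
  simp only [compute_exposure_score, compute_exposure_score_alt]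
  have ht : findings.foldl (fun acc f => acc + max 0 (PySem.Dict.getD (PySem.Dict.mk f) "risk_points" 0)) 0
      = pvTotalPoints findings 0 (findings.length : Int) := by
    rw [pvTotal_eq findings ((findings.length : Int) - 0).toNat 0 (findings.length : Int) rfl
        (by omega) (by omega) (by omega)]
    rw [PySem.List.foldl_add]
    simp
    rfl
  rw [ht, pvLevel_eq]
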